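-- pv_equiv track=rewrite | github.com/rickytang666/leetcode-rtang | easy/2000-2499/2119-a-number-after-a-double-reversal/main.py | isSameAfterReversals
-- ===== SOURCE A (Python) =====
-- def isSameAfterReversals(num: int) -> bool:
--     def rev(n):
--         ans = 0
--         while n > 0:
--             ans = ans * 10 + n % 10
--             n //= 10
--         return ans
--     return rev(rev(num)) == num
-- ===== SOURCE B (Python) =====
-- def isSameAfterReversals(num: int) -> bool:
--     # reversing twice only strips trailing zeros, so the number survives
--     # iff it is 0 or a positive number not ending in 0
--     return num == 0 or (num > 0 and num % 10 != 0)
-- ===== Notes on version B (the rewrite author's own statement) =====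
-- stated objective: simpler
-- what changed: Replaces the two digit-reversal loops with a closed-form boolean test: the number is unchanged by double reversal iff it is 0 or positive with no trailing zero.
import Mathlib
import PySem

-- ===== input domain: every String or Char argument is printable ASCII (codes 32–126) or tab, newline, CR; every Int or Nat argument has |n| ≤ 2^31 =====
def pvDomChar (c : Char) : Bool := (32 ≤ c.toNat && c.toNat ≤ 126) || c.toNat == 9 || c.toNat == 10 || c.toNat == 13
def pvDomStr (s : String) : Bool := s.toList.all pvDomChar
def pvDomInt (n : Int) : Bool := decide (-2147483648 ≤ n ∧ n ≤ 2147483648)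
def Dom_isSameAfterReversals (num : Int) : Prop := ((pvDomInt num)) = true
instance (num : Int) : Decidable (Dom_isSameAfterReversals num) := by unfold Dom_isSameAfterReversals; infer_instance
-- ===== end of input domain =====

-- B replaces A's two digit-reversal loops by a closed-form boolean test (same value everywhere).

-- ===== PORT A =====
-- inner helper `rev`: ans = 0; while n > 0: ans = ans*10 + n%10; n //= 10
def pyRevLoop (n ans : Int) : Int :=
  if n > 0 then pyRevLoop (PySem.Int.floordiv n 10) (ans * 10 + PySem.Int.mod n 10) else ans
termination_by n.toNat
decreasing_by
  rw [PySem.Int.floordiv_eq_ediv_of_pos (by norm_num)]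
  omega

def pyRev (n : Int) : Int := pyRevLoop n 0

def isSameAfterReversals (num : Int) : Bool := pyRev (pyRev num) == num

-- ===== PORT B =====
def isSameAfterReversals_alt (num : Int) : Bool :=
  (num == 0) || (decide (num > 0) && (PySem.Int.mod num 10 != 0))

-- ===== PRECONDITION & SPEC =====
def Spec_isSameAfterReversals (num : Int) (out : Bool) : Prop := out = isSameAfterReversals_alt num
instance (num : Int) (out : Bool) : Decidable (Spec_isSameAfterReversals num out) := by unfold Spec_isSameAfterReversals; infer_instance

-- ===== CLAIM (what is proved, stated in full; the proofs are below) =====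
def Claim_equal_isSameAfterReversals : Prop := ∀ (num : Int), Dom_isSameAfterReversals num → Spec_isSameAfterReversals num (isSameAfterReversals num)

-- ===== LEMMAS AND PROOFS =====

-- Nat shadow of A's reversal loop
def natRev (n ans : Nat) : Nat :=
  if n = 0 then ans else natRev (n / 10) (ans * 10 + n % 10)
termination_by n
decreasing_by omega

theorem pyRevLoop_natCast (n a : Nat) : pyRevLoop (n : Int) (a : Int) = ((natRev n a : Nat) : Int) := by
  induction n using Nat.strong_induction_on generalizing a with
  | _ n ih =>
    rw [pyRevLoop, natRev]
    by_cases h : n = 0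
    · simp [h]
    · have hpos : (0 : Int) < (n : Int) := by exact_mod_cast Nat.pos_of_ne_zero h
      rw [if_pos hpos, if_neg h]
      have hdiv : PySem.Int.floordiv (n : Int) 10 = ((n / 10 : Nat) : Int) := by
        rw [PySem.Int.floordiv_eq_ediv_of_pos (by norm_num)]; omega
      have hmod : (a : Int) * 10 + PySem.Int.mod (n : Int) 10 = ((a * 10 + n % 10 : Nat) : Int) := by
        rw [PySem.Int.mod_eq_emod_of_pos (by norm_num)]; push_cast; omega
      rw [hdiv, hmod, ih (n / 10) (by omega)]

theorem natRev_eq (n : Nat) : ∀ a : Nat,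
    natRev n a = Nat.ofDigits 10 (Nat.digits 10 n).reverse + a * 10 ^ (Nat.digits 10 n).length := by
  induction n using Nat.strong_induction_on with
  | _ n ih =>
    intro a
    rw [natRev]
    by_cases h : n = 0
    · simp [h]
    · rw [if_neg h, ih (n / 10) (by omega)]
      rw [Nat.digits_def' (by norm_num : (1:Nat) < 10) (Nat.pos_of_ne_zero h)]
      simp [Nat.ofDigits_append, pow_succ]
      ring

theorem natRev_zero_acc (n : Nat) : natRev n 0 = Nat.ofDigits 10 (Nat.digits 10 n).reverse := by
  simp [natRev_eq]

-- double reversal is the identity on positive numbers without a trailing zero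
theorem natRev_natRev_of_mod (n : Nat) (h0 : n ≠ 0) (h10 : n % 10 ≠ 0) :
    natRev (natRev n 0) 0 = n := by
  rw [natRev_zero_acc, natRev_zero_acc]
  have hd : Nat.digits 10 (Nat.ofDigits 10 (Nat.digits 10 n).reverse) = (Nat.digits 10 n).reverse := by
    apply Nat.digits_ofDigits 10 (by norm_num)
    · intro d hd
      exact Nat.digits_lt_base (by norm_num) (List.mem_reverse.mp hd)
    · intro hne
      have h1 : (Nat.digits 10 n).reverse.getLast? = some (n % 10) := by
        rw [Nat.digits_def' (by norm_num : (1:Nat) < 10) (Nat.pos_of_ne_zero h0), List.reverse_cons]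
        exact List.getLast?_concat
      have h2 := List.getLast?_eq_some_getLast hne
      rw [h2] at h1
      intro hz
      rw [hz] at h1
      exact h10 (by exact_mod_cast (Option.some_injective _ h1).symm)
  rw [hd, List.reverse_reverse, Nat.ofDigits_digits]

theorem natRev_strip (n : Nat) (h10 : n % 10 = 0) : natRev n 0 = natRev (n / 10) 0 := by
  rw [natRev]
  by_cases h : n = 0
  · have e : natRev 0 0 = 0 := by rw [natRev]; simp
    simp [h, e]
  · rw [if_neg h, h10]

theorem natRev_natRev_le (n : Nat) : natRev (natRev n 0) 0 ≤ n := by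
  induction n using Nat.strong_induction_on with
  | _ n ih =>
    by_cases h : n = 0
    · have e : natRev 0 0 = 0 := by rw [natRev]; simp
      simp [h, e]
    · by_cases h10 : n % 10 = 0
      · rw [natRev_strip n h10]
        have := ih (n / 10) (by omega)
        omega
      · rw [natRev_natRev_of_mod n h h10]

theorem natRev_natRev_iff (n : Nat) (h0 : n ≠ 0) :
    (natRev (natRev n 0) 0 = n) ↔ n % 10 ≠ 0 := by
  constructor
  · intro he h10
    rw [natRev_strip n h10] at he
    have h1 := natRev_natRev_le (n / 10)
    omega
  · exact natRev_natRev_of_mod n h0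

theorem pyRev_natCast (n : Nat) : pyRevLoop (n : Int) 0 = ((natRev n 0 : Nat) : Int) := by
  simpa using pyRevLoop_natCast n 0

theorem pyRevLoop_nonpos (n : Int) (h : n ≤ 0) : pyRevLoop n 0 = 0 := by
  rw [pyRevLoop, if_neg (by omega)]

-- ===== VERDICT (by name: the statement is the Claim_ definition above) =====
theorem isSameAfterReversals_spec : Claim_equal_isSameAfterReversals := by
  intro num _
  unfold Spec_isSameAfterReversals isSameAfterReversals isSameAfterReversals_alt pyRev
  by_cases hpos : 0 < num
  · set n : Nat := num.toNat with hn
    have hnum : num = (n : Int) := by omega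
    have hne : n ≠ 0 := by omega
    rw [hnum, pyRev_natCast n, pyRev_natCast]
    have hmod : PySem.Int.mod (n : Int) 10 = ((n % 10 : Nat) : Int) := by
      rw [PySem.Int.mod_eq_emod_of_pos (by norm_num)]; omega
    rw [hmod]
    apply Bool.eq_iff_iff.mpr
    simp only [beq_iff_eq, Bool.or_eq_true, Bool.and_eq_true, decide_eq_true_eq, bne_iff_ne,
      ne_eq, gt_iff_lt]
    constructor
    · intro he
      have hx : natRev (natRev n 0) 0 = n := by exact_mod_cast he
      have h10 := (natRev_natRev_iff n hne).mp hx
      omega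
    · rintro (h0 | ⟨-, h10⟩)
      · exact absurd (by exact_mod_cast h0) hne
      · have h10' : n % 10 ≠ 0 := by omega
        rw [show natRev (natRev n 0) 0 = n from (natRev_natRev_iff n hne).mpr h10']
  · rw [pyRevLoop_nonpos num (by omega), pyRevLoop_nonpos 0 (by omega)]
    have h3 : decide (0 < num) = false := by simp; omega
    rw [h3]
    simp only [Bool.false_and, Bool.or_false]
    simp [eq_comm]
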